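-- pv_equiv track=rewrite | github.com/casperfibaek/buteo | buteo/utils/core_utils.py | step_ranges
-- ===== SOURCE A (Python) =====
-- from typing import Any, Union, List, Optional, Dict, Tuple
--
-- def step_ranges(
--     arr_with_steps: List[List[Any]],
-- ) -> List[Dict[str, int]]:
--     """
--     Get the ranges of each step.
--
--     Args:
--         arr_with_steps (list): The array with steps.
--
--     Returns:
--         list: A list of dictionaries of type: { "id": int, "start": int, "stop": int}.
--     """
--     assert isinstance(arr_with_steps, list), "arr_with_steps must be a list."
--
--     start_stop = []
--     last = 0
--     for idx, step_size in enumerate(arr_with_steps):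
--         fid = idx + 1
--
--         start_stop.append(
--             {
--                 "id": fid,
--                 "start": last,
--                 "stop": last + step_size,
--             }
--         )
--
--         last += step_size
--
--     return start_stop
-- ===== SOURCE B (Python) =====
-- from typing import Any, List, Dict
--
-- def step_ranges(
--     arr_with_steps: List[List[Any]],
-- ) -> List[Dict[str, int]]:
--     """Two-pass version: accumulate the cumulative boundaries first, then
--     emit one record per consecutive pair of boundaries."""
--     assert isinstance(arr_with_steps, list), "arr_with_steps must be a list."
--
--     bounds = [0]
--     for step_size in arr_with_steps:
--         bounds.append(bounds[-1] + step_size)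
--
--     return [
--         {"id": i + 1, "start": start, "stop": stop}
--         for i, (start, stop) in enumerate(zip(bounds, bounds[1:]))
--     ]
-- ===== Notes on version B (the rewrite author's own statement) =====
-- stated objective: alternative
-- what changed: A builds each record inside one loop that threads a running 'last' offset; B first accumulates the full list of cumulative boundaries and then emits records from consecutive boundary pairs via enumerate(zip(bounds, bounds[1:])).
import Mathlib
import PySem

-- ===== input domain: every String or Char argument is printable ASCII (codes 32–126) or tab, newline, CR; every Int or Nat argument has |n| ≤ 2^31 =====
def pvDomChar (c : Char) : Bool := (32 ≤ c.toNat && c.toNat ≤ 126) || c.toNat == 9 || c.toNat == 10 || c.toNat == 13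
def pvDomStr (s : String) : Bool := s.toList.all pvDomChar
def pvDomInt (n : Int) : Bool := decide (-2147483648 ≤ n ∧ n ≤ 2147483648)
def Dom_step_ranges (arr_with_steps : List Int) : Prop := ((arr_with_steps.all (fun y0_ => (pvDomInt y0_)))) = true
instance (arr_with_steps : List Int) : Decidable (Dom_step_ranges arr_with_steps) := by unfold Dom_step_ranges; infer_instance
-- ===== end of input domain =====

-- B separates the work into two passes — accumulate cumulative boundaries, then emit one
-- record per consecutive boundary pair — instead of A's single loop threading a running offset.


-- ===== PORT A =====
-- one loop over enumerate(arr); state = (start_stop, last)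
def step_ranges (arr_with_steps : List Int) : List (List (String × Int)) :=
  let st := (PySem.List.enumerate arr_with_steps 0).foldl
    (fun (acc : List (List (String × Int)) × Int) p =>
      let fid := p.1 + 1
      (acc.1 ++ [[("id", fid), ("start", acc.2), ("stop", acc.2 + p.2)]], acc.2 + p.2))
    ([], 0)
  st.1

-- ===== PORT B =====
-- pass 1: bounds = [0]; append bounds[-1] + step for each step.  pass 2: records from
-- enumerate(zip(bounds, bounds[1:])).  bounds[-1] via PySem.List.pyGetD: bounds is never empty.
def step_ranges_alt (arr_with_steps : List Int) : List (List (String × Int)) :=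
  let bounds := arr_with_steps.foldl
    (fun (bs : List Int) step_size => bs ++ [PySem.List.pyGetD bs (-1) 0 + step_size]) [0]
  (PySem.List.enumerate (bounds.zip (PySem.List.slice bounds (some 1) none)) 0).map
    (fun p => [("id", p.1 + 1), ("start", p.2.1), ("stop", p.2.2)])

-- ===== PRECONDITION & SPEC =====
def Spec_step_ranges (arr_with_steps : List Int) (out : List (List (String × Int))) : Prop := out = step_ranges_alt arr_with_steps
instance (arr_with_steps : List Int) (out : List (List (String × Int))) : Decidable (Spec_step_ranges arr_with_steps out) := by unfold Spec_step_ranges; infer_instance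

-- ===== CLAIM (what is proved, stated in full; the proofs are below) =====
def Claim_equal_step_ranges : Prop := ∀ (arr_with_steps : List Int), Dom_step_ranges arr_with_steps → Spec_step_ranges arr_with_steps (step_ranges arr_with_steps)

-- ===== LEMMAS AND PROOFS =====

/-- canonical form both ports are reduced to -/
def pvCanon : List Int → Int → Int → List (List (String × Int))
  | [], _, _ => []
  | s :: r, idx, last =>
      [("id", idx + 1), ("start", last), ("stop", last + s)] :: pvCanon r (idx + 1) (last + s)

theorem stepA_eq_canon (arr : List Int) :
    ∀ (idx last : Int) (acc : List (List (String × Int))),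
      ((PySem.List.enumerate arr idx).foldl
        (fun (a : List (List (String × Int)) × Int) p =>
          (a.1 ++ [[("id", p.1 + 1), ("start", a.2), ("stop", a.2 + p.2)]], a.2 + p.2))
        (acc, last)).1 = acc ++ pvCanon arr idx last := by
  induction arr with
  | nil => intro idx last acc; simp [PySem.List.enumerate_nil, pvCanon]
  | cons s r ih =>
      intro idx last acc
      simp only [PySem.List.enumerate_cons, List.foldl_cons, pvCanon]
      rw [ih]
      simp

def pvBStep : List Int → List Int → List Int :=
  fun arr bs0 => arr.foldl (fun (bs : List Int) step_size => bs ++ [PySem.List.pyGetD bs (-1) 0 + step_size]) bs0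

def pvBounds : Int → List Int → List Int
  | c, [] => [c]
  | c, s :: r => c :: pvBounds (c + s) r

theorem bfold_append (arr : List Int) :
    ∀ (ys : List Int) (c : Int), pvBStep arr (ys ++ [c]) = ys ++ pvBStep arr [c] := by
  induction arr with
  | nil => intro ys c; simp [pvBStep]
  | cons s r ih =>
      intro ys c
      simp only [pvBStep, List.foldl_cons, PySem.List.pyGetD_neg_one_append_singleton]
      have h1 : ys ++ [c] ++ [c + s] = (ys ++ [c]) ++ [c + s] := by simp
      have h2 : ([c] : List Int) ++ [c + s] = [c] ++ [c + s] := rfl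
      show pvBStep r ((ys ++ [c]) ++ [c + s]) = ys ++ pvBStep r ([c] ++ [c + s])
      rw [ih ((ys ++ [c])) (c + s), ih [c] (c + s)]
      simp

theorem bfold_eq_bounds (arr : List Int) : ∀ (c : Int), pvBStep arr [c] = pvBounds c arr := by
  induction arr with
  | nil => intro c; simp [pvBStep, pvBounds]
  | cons s r ih =>
      intro c
      simp only [pvBStep, List.foldl_cons]
      show pvBStep r ([c] ++ [c + s]) = pvBounds c (s :: r)
      rw [bfold_append r [c] (c + s), ih (c + s)]
      rfl

theorem bounds_head (x : Int) (r : List Int) :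
    pvBounds x r = x :: (pvBounds x r).tail := by
  cases r <;> rfl

theorem zip_bounds_eq_canon (arr : List Int) :
    ∀ (c k : Int),
      (PySem.List.enumerate ((pvBounds c arr).zip ((pvBounds c arr).tail)) k).map
        (fun p => [("id", p.1 + 1), ("start", p.2.1), ("stop", p.2.2)])
      = pvCanon arr k c := by
  induction arr with
  | nil => intro c k; simp [pvBounds, PySem.List.enumerate_nil, pvCanon]
  | cons s r ih =>
      intro c k
      show (PySem.List.enumerate ((c :: pvBounds (c + s) r).zip (pvBounds (c + s) r)) k).map _ = _
      rw [bounds_head (c + s) r]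
      simp only [List.zip_cons_cons, PySem.List.enumerate_cons, List.map_cons]
      rw [← bounds_head (c + s) r, ih (c + s) (k + 1)]
      rfl

-- ===== VERDICT (by name: the statement is the Claim_ definition above) =====
theorem step_ranges_spec : Claim_equal_step_ranges := by
  intro arr _
  show step_ranges arr = step_ranges_alt arr
  unfold step_ranges step_ranges_alt
  rw [stepA_eq_canon arr 0 0 []]
  have hb : arr.foldl (fun (bs : List Int) step_size => bs ++ [PySem.List.pyGetD bs (-1) 0 + step_size]) [0]
      = pvBounds 0 arr := bfold_eq_bounds arr 0
  simp only [hb, PySem.List.slice_from_one]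
  rw [zip_bounds_eq_canon arr 0 0]
  simp
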